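-- pv_equiv track=rewrite | github.com/okorach/sonar-tools | sonarqube/issues.py | is_log_a_reviewed
-- ===== SOURCE A (Python) =====
-- def is_log_a_reviewed(log):
--     cond1 = False
--     cond2 = False
--     for diff in log['diffs']:
--         if diff['key'] == 'resolution' and 'newValue' in diff and diff['newValue'] == 'FIXED':
--             cond1 = True
--         if diff['key'] == 'status' and 'newValue' in diff and diff['newValue'] == 'REVIEWED':
--             cond2 = True
--     return cond1 and cond2
-- ===== SOURCE B (Python) =====
-- def is_log_a_reviewed(log):
--     def seen(diffs, key, value):
--         # recursive early-exit scan: True as soon as a matching diff is found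
--         if not diffs:
--             return False
--         d = diffs[0]
--         if d['key'] == key and d.get('newValue') == value:
--             return True
--         return seen(diffs[1:], key, value)
--
--     diffs = log['diffs']
--     return seen(diffs, 'resolution', 'FIXED') and seen(diffs, 'status', 'REVIEWED')
-- ===== Notes on version B (the rewrite author's own statement) =====
-- stated objective: alternative
-- what changed: Replaces A's single full-scan loop that mutates two boolean flags with a recursive early-exit search helper applied in two staged, short-circuited passes (the second pass is skipped entirely unless the first finds a FIXED resolution); d.get('newValue') returns None for diffs lacking the key, which never equals the non-None target strings.
import Mathlib
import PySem

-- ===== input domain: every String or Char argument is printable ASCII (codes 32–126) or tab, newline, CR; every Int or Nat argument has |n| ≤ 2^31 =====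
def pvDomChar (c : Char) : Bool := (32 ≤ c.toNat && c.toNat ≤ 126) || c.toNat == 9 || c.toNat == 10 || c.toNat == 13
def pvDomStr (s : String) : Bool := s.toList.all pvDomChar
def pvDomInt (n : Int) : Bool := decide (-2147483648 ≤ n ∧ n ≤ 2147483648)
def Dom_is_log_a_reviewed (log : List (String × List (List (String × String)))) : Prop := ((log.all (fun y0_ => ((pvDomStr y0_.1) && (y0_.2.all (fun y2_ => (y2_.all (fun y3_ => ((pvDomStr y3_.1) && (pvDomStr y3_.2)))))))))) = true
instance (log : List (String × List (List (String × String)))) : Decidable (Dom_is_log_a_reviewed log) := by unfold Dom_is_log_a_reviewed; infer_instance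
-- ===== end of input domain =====

-- B replaces A's single full scan mutating two flags with a recursive early-exit
-- search helper used in two staged short-circuited passes (objective: alternative).

-- ===== PORT A =====
-- A's loop: two boolean flags set while scanning log['diffs'].
def is_log_a_reviewed (log : List (String × List (List (String × String)))) : Bool :=
  match (PySem.Dict.mk log).get? "diffs" with
  | none => false    -- Python: KeyError, excluded by Pre_
  | some diffs =>
    let r := diffs.foldl (fun (st : Bool × Bool) diff =>
      let c1 := if ((PySem.Dict.mk diff).get? "key").getD "" == "resolution"
                   && (PySem.Dict.mk diff).get? "newValue" == some "FIXED" then true else st.1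
      let c2 := if ((PySem.Dict.mk diff).get? "key").getD "" == "status"
                   && (PySem.Dict.mk diff).get? "newValue" == some "REVIEWED" then true else st.2
      (c1, c2)) (false, false)
    r.1 && r.2

-- ===== PORT B =====
-- B's helper: recursive early-exit scan for one (key, value) pair.
def pvSeen (diffs : List (List (String × String))) (key value : String) : Bool :=
  match diffs with
  | [] => false
  | d :: rest =>
    if ((PySem.Dict.mk d).get? "key").getD "" == key
        && (PySem.Dict.mk d).get? "newValue" == some value then true
    else pvSeen rest key value

def is_log_a_reviewed_alt (log : List (String × List (List (String × String)))) : Bool :=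
  match (PySem.Dict.mk log).get? "diffs" with
  | none => false    -- Python: KeyError, excluded by Pre_
  | some diffs =>
    pvSeen diffs "resolution" "FIXED" && pvSeen diffs "status" "REVIEWED"

-- ===== PRECONDITION & SPEC =====
-- Pre_ excludes exactly the inputs where the Python raises KeyError:
-- a log without a 'diffs' entry, or a diff without a 'key' entry.
def Pre_is_log_a_reviewed (log : List (String × List (List (String × String)))) : Prop :=
  ((PySem.Dict.mk log).get? "diffs").isSome = true ∧
  ∀ d ∈ ((PySem.Dict.mk log).get? "diffs").getD [], ((PySem.Dict.mk d).get? "key").isSome = true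
instance (log : List (String × List (List (String × String)))) : Decidable (Pre_is_log_a_reviewed log) := by unfold Pre_is_log_a_reviewed; infer_instance

def pvWitness_is_log_a_reviewed : (List (String × List (List (String × String)))) :=
  [("diffs", [[("key", "resolution"), ("newValue", "FIXED")], [("key", "status"), ("newValue", "REVIEWED")]])]

def Spec_is_log_a_reviewed (log : List (String × List (List (String × String)))) (out : Bool) : Prop := out = is_log_a_reviewed_alt log
instance (log : List (String × List (List (String × String)))) (out : Bool) : Decidable (Spec_is_log_a_reviewed log out) := by unfold Spec_is_log_a_reviewed; infer_instance

-- ===== CLAIM =====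
def Claim_equal_is_log_a_reviewed : Prop := ∀ (log : List (String × List (List (String × String)))), Dom_is_log_a_reviewed log → Pre_is_log_a_reviewed log → Spec_is_log_a_reviewed log (is_log_a_reviewed log)

-- ===== LEMMAS AND PROOFS =====

-- B's recursive scan is a List.any.
lemma pvSeen_eq_any (diffs : List (List (String × String))) (key value : String) :
    pvSeen diffs key value
      = diffs.any (fun d => ((PySem.Dict.mk d).get? "key").getD "" == key
          && (PySem.Dict.mk d).get? "newValue" == some value) := by
  induction diffs with
  | nil => rfl
  | cons d ds ih =>
    simp only [pvSeen, List.any_cons, ih]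
    split_ifs with h <;> simp [h]

-- A's fold with two independent flags is two List.any scans.
lemma foldA_eq_any (diffs : List (List (String × String))) (a b : Bool) :
    diffs.foldl (fun (st : Bool × Bool) diff =>
      let c1 := if ((PySem.Dict.mk diff).get? "key").getD "" == "resolution"
                   && (PySem.Dict.mk diff).get? "newValue" == some "FIXED" then true else st.1
      let c2 := if ((PySem.Dict.mk diff).get? "key").getD "" == "status"
                   && (PySem.Dict.mk diff).get? "newValue" == some "REVIEWED" then true else st.2
      (c1, c2)) (a, b)
    = (a || diffs.any (fun d => ((PySem.Dict.mk d).get? "key").getD "" == "resolution"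
                   && (PySem.Dict.mk d).get? "newValue" == some "FIXED"),
       b || diffs.any (fun d => ((PySem.Dict.mk d).get? "key").getD "" == "status"
                   && (PySem.Dict.mk d).get? "newValue" == some "REVIEWED")) := by
  induction diffs generalizing a b with
  | nil => simp
  | cons d ds ih =>
    simp only [List.foldl_cons, List.any_cons, ih]
    refine Prod.ext ?_ ?_ <;> (dsimp only; split_ifs with h <;> simp [h])

theorem is_log_a_reviewed_spec_aux (log : List (String × List (List (String × String)))) :
    is_log_a_reviewed log = is_log_a_reviewed_alt log := by
  unfold is_log_a_reviewed is_log_a_reviewed_alt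
  cases h : (PySem.Dict.mk log).get? "diffs" with
  | none => rfl
  | some diffs => simp only [foldA_eq_any, pvSeen_eq_any, Bool.false_or]

-- ===== VERDICT =====
theorem is_log_a_reviewed_spec : Claim_equal_is_log_a_reviewed := by
  intro log _ _
  exact is_log_a_reviewed_spec_aux log
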